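-- pv_equiv track=rewrite | github.com/ks24pon/Recursion_Python_coding | easy/sample58.py | videosToWatch
-- ===== SOURCE A (Python) =====
-- def videosToWatch(time,dailyGoal):
--     # 累計の視聴時間
--     total = 0
--
--     # 見た動画の本数
--     count = 0
--
--     # time配列の中の各動画を1つずつループ
--     for t in time:
--         total += t # 累計時間に追加
--         count += 1 # 動画本数を1本追加
--
--         # 累計時間が目標に達成したら、その時点で本数を返す
--         if total >= dailyGoal:
--             return count
--     # 最後まで見ても目標に届かなかった場合は-1を返す
--     return -1
-- ===== SOURCE B (Python) =====
-- def videosToWatch(time, dailyGoal):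
--     # Divide and conquer: the first 1-based prefix of xs whose sum reaches goal
--     # is either inside the left half, or (with the left half's total subtracted
--     # from the goal) inside the right half, offset by the left half's length.
--     def solve(xs, goal):
--         if not xs:
--             return -1
--         if len(xs) == 1:
--             return 1 if xs[0] >= goal else -1
--         mid = len(xs) // 2
--         left, right = xs[:mid], xs[mid:]
--         a = solve(left, goal)
--         if a != -1:
--             return a
--         b = solve(right, goal - sum(left))
--         return -1 if b == -1 else mid + b
--     return solve(time, dailyGoal)
-- ===== Notes on version B (the rewrite author's own statement) =====
-- stated objective: alternative
-- what changed: B replaces A's single left-to-right running-total scan with a divide-and-conquer recursion: split the list in half, look for the answer in the left half, otherwise solve the right half with the goal reduced by the left half's sum and offset the index.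
import Mathlib
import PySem

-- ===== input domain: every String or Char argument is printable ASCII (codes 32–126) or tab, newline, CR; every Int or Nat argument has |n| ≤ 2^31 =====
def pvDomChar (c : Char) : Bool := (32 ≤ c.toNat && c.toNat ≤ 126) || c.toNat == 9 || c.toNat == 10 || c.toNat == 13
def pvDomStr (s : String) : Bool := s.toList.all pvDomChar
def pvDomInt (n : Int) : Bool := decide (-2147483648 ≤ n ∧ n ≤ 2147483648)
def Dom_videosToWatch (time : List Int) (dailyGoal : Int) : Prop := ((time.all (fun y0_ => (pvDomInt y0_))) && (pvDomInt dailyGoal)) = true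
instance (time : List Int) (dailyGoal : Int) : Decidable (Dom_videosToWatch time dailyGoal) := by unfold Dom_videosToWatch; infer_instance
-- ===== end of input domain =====

-- B replaces A's running-total scan by a divide-and-conquer recursion on list halves (alternative decomposition, not claimed faster).

-- ===== PORT A =====
-- for t in time: total += t; count += 1; if total >= dailyGoal: return count / return -1
def videosToWatchGo (total count dailyGoal : Int) : List Int → Int
  | [] => -1
  | t :: ts =>
    if total + t ≥ dailyGoal then count + 1
    else videosToWatchGo (total + t) (count + 1) dailyGoal ts

def videosToWatch (time : List Int) (dailyGoal : Int) : Int :=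
  videosToWatchGo 0 0 dailyGoal time

-- ===== PORT B =====
-- solve(xs, goal): empty → -1; singleton → 1 or -1; else split at mid,
-- try the left half, else the right half with goal - sum(left), offset by mid.
-- (the two lemmas are cited by the port's decreasing_by)
theorem pvTakeHalfLt (x y : Int) (rest : List Int) :
    ((x :: y :: rest).take ((x :: y :: rest).length / 2)).length < (x :: y :: rest).length := by
  simp only [List.length_take, List.length_cons]
  omega

theorem pvDropHalfLt (x y : Int) (rest : List Int) :
    ((x :: y :: rest).drop ((x :: y :: rest).length / 2)).length < (x :: y :: rest).length := by
  simp only [List.length_drop, List.length_cons]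
  omega

def pvSolveDC : List Int → Int → Int
  | [], _ => -1
  | [t], goal => if t ≥ goal then 1 else -1
  | x :: y :: rest, goal =>
    let xs := x :: y :: rest
    let mid := xs.length / 2
    let left := xs.take mid
    let right := xs.drop mid
    let a := pvSolveDC left goal
    if a ≠ -1 then a
    else
      let b := pvSolveDC right (goal - left.sum)
      if b = -1 then -1 else (mid : Int) + b
termination_by xs _ => xs.length
decreasing_by
  · exact pvTakeHalfLt x y rest
  · exact pvDropHalfLt x y rest

def videosToWatch_alt (time : List Int) (dailyGoal : Int) : Int :=
  pvSolveDC time dailyGoal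

-- ===== PRECONDITION & SPEC =====
def Spec_videosToWatch (time : List Int) (dailyGoal : Int) (out : Int) : Prop := out = videosToWatch_alt time dailyGoal
instance (time : List Int) (dailyGoal : Int) (out : Int) : Decidable (Spec_videosToWatch time dailyGoal out) := by unfold Spec_videosToWatch; infer_instance

-- ===== CLAIM (what is proved, stated in full; the proofs are below) =====
def Claim_equal_videosToWatch : Prop := ∀ (time : List Int) (dailyGoal : Int), Dom_videosToWatch time dailyGoal → Spec_videosToWatch time dailyGoal (videosToWatch time dailyGoal)

-- ===== LEMMAS AND PROOFS =====

-- reference linear scanner: first 1-based index whose prefix sum reaches goal, else -1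
def pvLin : List Int → Int → Int
  | [], _ => -1
  | t :: ts, goal =>
    if t ≥ goal then 1
    else
      let r := pvLin ts (goal - t)
      if r = -1 then -1 else r + 1

theorem pvLin_pos (xs : List Int) : ∀ goal : Int, pvLin xs goal = -1 ∨ 1 ≤ pvLin xs goal := by
  induction xs with
  | nil => intro goal; left; rfl
  | cons t ts ih =>
    intro goal
    simp only [pvLin]
    by_cases h : t ≥ goal
    · simp [h]
    · simp only [h, if_false]
      rcases ih (goal - t) with h1 | h1 <;> simp [h1] <;> omega

theorem pvLin_append (l : List Int) : ∀ (r : List Int) (goal : Int),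
    pvLin (l ++ r) goal
      = (let a := pvLin l goal;
         if a = -1 then
           (let b := pvLin r (goal - l.sum); if b = -1 then -1 else (l.length : Int) + b)
         else a) := by
  induction l with
  | nil =>
    intro r goal
    by_cases h : pvLin r goal = -1 <;> simp [pvLin, h]
  | cons t l ih =>
    intro r goal
    simp only [List.cons_append, pvLin, List.sum_cons, List.length_cons]
    by_cases h : t ≥ goal
    · simp [h]
    · simp only [h, if_false]
      rw [ih r (goal - t), show goal - (t + l.sum) = goal - t - l.sum from by ring]
      have hb := pvLin_pos r (goal - t - l.sum)
      have ha := pvLin_pos l (goal - t)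
      by_cases h2 : pvLin l (goal - t) = -1 <;>
        by_cases h3 : pvLin r (goal - t - l.sum) = -1 <;>
          simp only [h2, h3, if_true, if_false, if_pos, if_neg, not_false_iff] <;>
          simp [h2, h3] <;> push_cast <;> omega

theorem pvSolveDC_eq_pvLin_aux (n : Nat) : ∀ (xs : List Int), xs.length ≤ n →
    ∀ goal : Int, pvSolveDC xs goal = pvLin xs goal := by
  induction n with
  | zero =>
    intro xs hlen goal
    have : xs = [] := List.eq_nil_of_length_eq_zero (Nat.le_zero.mp hlen)
    subst this; simp [pvSolveDC, pvLin]
  | succ n ih =>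
    intro xs hlen goal
    match xs with
    | [] => simp [pvSolveDC, pvLin]
    | [t] =>
      simp only [pvSolveDC, pvLin]
      split <;> rfl
    | x :: y :: rest =>
      simp only [pvSolveDC]
      set xs := x :: y :: rest with hxs
      set mid := xs.length / 2 with hmid
      have hlen2 : 2 ≤ xs.length := by simp [hxs]
      have hmidlt : mid < xs.length := by omega
      have hmid1 : 1 ≤ mid := by omega
      have hltake : (xs.take mid).length ≤ n := by
        simp only [List.length_take]
        omega
      have hldrop : (xs.drop mid).length ≤ n := by
        simp only [List.length_drop]
        omega
      rw [ih (xs.take mid) hltake goal, ih (xs.drop mid) hldrop (goal - (xs.take mid).sum)]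
      have hsplit := pvLin_append (xs.take mid) (xs.drop mid) goal
      rw [List.take_append_drop] at hsplit
      rw [hsplit]
      have hmlen : (xs.take mid).length = mid := by
        simp only [List.length_take]
        omega
      rw [hmlen]
      by_cases h : pvLin (xs.take mid) goal = -1 <;> simp [h]

theorem videosToWatchGo_eq (ts : List Int) : ∀ (total count goal : Int),
    videosToWatchGo total count goal ts
      = (let r := pvLin ts (goal - total); if r = -1 then -1 else count + r) := by
  induction ts with
  | nil => intro total count goal; simp [videosToWatchGo, pvLin]
  | cons t ts ih =>
    intro total count goal
    simp only [videosToWatchGo, pvLin]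
    by_cases h : t ≥ goal - total
    · have h' : total + t ≥ goal := by omega
      simp [h, h']
    · have h' : ¬ total + t ≥ goal := by omega
      simp only [h, h', if_false]
      rw [ih (total + t) (count + 1) goal,
        show goal - (total + t) = goal - total - t from by ring]
      have hp := pvLin_pos ts (goal - total - t)
      by_cases h1 : pvLin ts (goal - total - t) = -1 <;> simp [h1] <;> omega

-- ===== VERDICT (by name: the statement is the Claim_ definition above) =====
theorem videosToWatch_spec : Claim_equal_videosToWatch := by
  intro time goal _
  show videosToWatch time goal = videosToWatch_alt time goal
  rw [videosToWatch, videosToWatch_alt, videosToWatchGo_eq,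
    pvSolveDC_eq_pvLin_aux time.length time le_rfl]
  simp only [sub_zero]
  split <;> omega
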